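-- pv_equiv track=rewrite | github.com/gustavomarioz/elmoro | Crianzas/static/Crianzas/py/granjaelmoro.py | importevalido
-- ===== SOURCE A (Python) =====
-- def importevalido(imp):
--     coma = imp.find(",", 0)
--     inicio = coma + 1
--     if coma != -1:
--         dec = imp[inicio:]
--         if not dec.isdigit():
--             return False
--         entera = imp[0:coma]
--         if len(entera) == 0:
--             return False
--     else:
--         entera = imp
--
--     if len(entera) == 1 and entera == "0" and int(dec) == 0:
--         return False
--
--     caracteres = "0123456789."
--     digitos = 0
--     puntos = 0
--     for i in range(len(entera) - 1, -1, -1):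
--         if caracteres.find(entera[i], 0) == -1:
--             return False
--         elif entera[i] == ".":
--             if digitos == 3:
--                 puntos += 1
--                 digitos = 0
--             else:
--                 return False
--         else:
--             digitos += 1
--
--     if puntos == 0:
--         if digitos == 0:
--             return False
--         else:
--             return True
--     elif puntos > 0:
--         if digitos == 0:
--             return False
--         elif digitos > 3:
--             return False
--         else:
--             return True
--     else:
--         return False
-- ===== SOURCE B (Python) =====
-- def importevalido(imp):
--     coma = imp.find(",")
--     if coma != -1:
--         dec = imp[coma + 1:]
--         if not dec.isdigit():
--             return False
--         entera = imp[:coma]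
--         if len(entera) == 0:
--             return False
--         if entera == "0" and int(dec) == 0:
--             return False
--     else:
--         entera = imp
--     grupos = entera.split(".")
--     if len(grupos) == 1:
--         g = grupos[0]
--         return len(g) > 0 and all(c in "0123456789" for c in g)
--     return (1 <= len(grupos[0]) <= 3
--             and all(len(g) == 3 for g in grupos[1:])
--             and all(c in "0123456789" for g in grupos for c in g))
-- ===== Notes on version B (the rewrite author's own statement) =====
-- stated objective: simpler
-- what changed: A's stateful right-to-left digit/dot counter over the integer part is replaced by splitting it on '.' and checking each group directly (single group: nonempty all-digits; several groups: first group 1-3 digits, all others exactly 3 digits).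
import Mathlib
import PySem

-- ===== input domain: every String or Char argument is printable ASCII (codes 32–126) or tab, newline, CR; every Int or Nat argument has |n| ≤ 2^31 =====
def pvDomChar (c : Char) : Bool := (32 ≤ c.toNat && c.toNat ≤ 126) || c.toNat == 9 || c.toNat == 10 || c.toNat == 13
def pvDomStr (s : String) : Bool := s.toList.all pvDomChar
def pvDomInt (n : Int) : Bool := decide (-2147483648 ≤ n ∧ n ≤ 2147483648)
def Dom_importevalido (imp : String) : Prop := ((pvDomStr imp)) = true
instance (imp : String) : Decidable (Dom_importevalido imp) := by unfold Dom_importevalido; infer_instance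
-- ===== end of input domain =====

-- B replaces A's stateful right-to-left digit/dot counter by splitting the integer part on '.'
-- and validating each group's length and characters directly (objective: simpler decomposition).

-- ===== PORT A =====
-- "0123456789." of A
def pvCaracteres : List Char := ['0','1','2','3','4','5','6','7','8','9','.']

-- A's for-loop over range(len(entera)-1, -1, -1) reading entera[i]: right-to-left over the
-- characters, i.e. structural recursion over entera.reverse with the same (digitos, puntos)
-- state; 'caracteres.find(entera[i], 0) == -1' is exactly non-membership in "0123456789.".
def pvLoopA : List Char → Int → Int → Option (Int × Int)
  | [], digitos, puntos => some (digitos, puntos)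
  | c :: rest, digitos, puntos =>
    if pvCaracteres.contains c = false then none
    else if c = '.' then
      if digitos = 3 then pvLoopA rest 0 (puntos + 1) else none
    else pvLoopA rest (digitos + 1) puntos

-- A's final if/elif/else on (digitos, puntos)
def pvFinishA : Option (Int × Int) → Bool
  | none => false
  | some (digitos, puntos) =>
    if puntos = 0 then if digitos = 0 then false else true
    else if puntos > 0 then
      if digitos = 0 then false
      else if digitos > 3 then false
      else true
    else false

-- The code after A's if/else: dec? = none is the no-comma branch, where Python's
-- 'int(dec) == 0' raises NameError on entera == "0" (excluded by Pre_; this port takes the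
-- condition as false there).  dec is all-digits and nonempty when dec? = some dec, so
-- PySem.Int.ofChars? is some and the .getD 1 default is never used.
def pvRestA (entera : List Char) (dec? : Option (List Char)) : Bool :=
  if entera.length == 1 && entera == ['0'] &&
      (match dec? with
        | some dec => (PySem.Int.ofChars? dec).getD 1 == 0
        | none => false) then false
  else pvFinishA (pvLoopA entera.reverse 0 0)

def importevalido (imp : String) : Bool :=
  let s := imp.toList
  let coma := PySem.Chars.find s [',']       -- imp.find(",", 0)
  let inicio := coma + 1
  if coma != -1 then
    let dec := PySem.Chars.slice s (some inicio) none
    if !(PySem.Chars.strIsdigit dec) then false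
    else
      let entera := PySem.Chars.slice s (some 0) (some coma)
      if entera.length == 0 then false
      else pvRestA entera (some dec)
  else pvRestA s none

-- ===== PORT B =====
def pvDigitos : List Char := ['0','1','2','3','4','5','6','7','8','9']

-- Source B's tail: grupos = entera.split("."); validate group lengths and characters
def pvAltCheck (grupos : List (List Char)) : Bool :=
  if grupos.length == 1 then
    let g := grupos.headD []
    decide (0 < g.length) && g.all (fun c => pvDigitos.contains c)
  else
    decide (1 ≤ (grupos.headD []).length ∧ (grupos.headD []).length ≤ 3)
    && grupos.tail.all (fun g => g.length == 3)
    && grupos.all (fun g => g.all (fun c => pvDigitos.contains c))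

-- grupos = entera.split(".")
def pvAltGroups (entera : List Char) : Bool :=
  pvAltCheck (PySem.Chars.splitOn entera ['.'])

def importevalido_alt (imp : String) : Bool :=
  let s := imp.toList
  let coma := PySem.Chars.find s [',']       -- imp.find(",")
  if coma != -1 then
    let dec := PySem.Chars.slice s (some (coma + 1)) none
    if !(PySem.Chars.strIsdigit dec) then false
    else
      let entera := PySem.Chars.slice s none (some coma)
      if entera.length == 0 then false
      else if entera == ['0'] && (PySem.Int.ofChars? dec).getD 1 == 0 then false
      else pvAltGroups entera
  else pvAltGroups s

-- ===== PRECONDITION & SPEC =====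
-- Pre_ excludes only imp = "0", on which A raises UnboundLocalError ('int(dec)' with dec unbound).
def Pre_importevalido (imp : String) : Prop := imp ≠ "0"
instance (imp : String) : Decidable (Pre_importevalido imp) := by unfold Pre_importevalido; infer_instance
def pvWitness_importevalido : String := "1.234"

def Spec_importevalido (imp : String) (out : Bool) : Prop := out = importevalido_alt imp
instance (imp : String) (out : Bool) : Decidable (Spec_importevalido imp out) := by unfold Spec_importevalido; infer_instance

-- ===== CLAIM (what is proved, stated in full; the proofs are below) =====
def Claim_equal_importevalido : Prop := ∀ (imp : String), Dom_importevalido imp → Pre_importevalido imp → Spec_importevalido imp (importevalido imp)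

-- ===== LEMMAS AND PROOFS =====

def pvGroups : List Char → List Char → List (List Char)
  | [], cur => [cur.reverse]
  | c :: rest, cur => if c = '.' then cur.reverse :: pvGroups rest [] else pvGroups rest (c :: cur)

theorem pv_go (fuel : Nat) : ∀ (l cur : List Char) (acc : List (List Char)), l.length < fuel →
    PySem.Chars.splitOn.go ['.'] fuel l cur acc = acc.reverse ++ pvGroups l cur := by
  induction fuel with
  | zero => intro l cur acc h; omega
  | succ fuel ih =>
    intro l cur acc h
    cases l with
    | nil => simp [PySem.Chars.splitOn.go, pvGroups]
    | cons c rest =>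
      rw [PySem.Chars.splitOn.go]
      by_cases hc : c = '.'
      · subst hc
        simp only [List.isPrefixOf, BEq.rfl, Bool.true_and, if_pos,
          List.length_cons, List.length_nil, List.drop_succ_cons, List.drop_zero]
        rw [ih rest [] _ (by simpa using Nat.lt_of_succ_lt_succ h)]
        simp [pvGroups]
      · have : ['.'].isPrefixOf (c :: rest) = false := by
          simp [List.isPrefixOf]; exact fun h' => (hc h'.symm).elim
        rw [this]
        simp only [Bool.false_eq_true, if_false]
        rw [ih rest (c :: cur) acc (by simpa using Nat.lt_of_succ_lt_succ h)]
        simp [pvGroups, hc]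

theorem pv_splitOn (l : List Char) : PySem.Chars.splitOn l ['.'] = pvGroups l [] := by
  rw [PySem.Chars.splitOn, pv_go (l.length + 1) l [] [] (by omega)]; simp

theorem pv_mem_caracteres (c : Char) :
    pvCaracteres.contains c = (PySem.Chars.isdigit c || c = '.') := by
  have hval : ∀ d : Char, (c = d) ↔ (c.val.toNat = d.val.toNat) := by
    intro d
    constructor
    · intro h; rw [h]
    · intro h; exact Char.ext (UInt32.toNat_inj.mp h)
  rw [Bool.eq_iff_iff]
  simp only [pvCaracteres, PySem.Chars.isdigit, List.contains_eq_mem, List.mem_cons,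
    List.mem_singleton, List.not_mem_nil, or_false, decide_eq_true_iff,
    Bool.or_eq_true, Bool.and_eq_true, Char.le_def, UInt32.le_iff_toNat_le]
  rw [hval '0', hval '1', hval '2', hval '3', hval '4', hval '5', hval '6', hval '7',
    hval '8', hval '9', hval '.']
  have e0 : '0'.val.toNat = 48 := rfl
  have e1 : '1'.val.toNat = 49 := rfl
  have e2 : '2'.val.toNat = 50 := rfl
  have e3 : '3'.val.toNat = 51 := rfl
  have e4 : '4'.val.toNat = 52 := rfl
  have e5 : '5'.val.toNat = 53 := rfl
  have e6 : '6'.val.toNat = 54 := rfl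
  have e7 : '7'.val.toNat = 55 := rfl
  have e8 : '8'.val.toNat = 56 := rfl
  have e9 : '9'.val.toNat = 57 := rfl
  have ed : '.'.val.toNat = 46 := rfl
  omega

theorem pv_mem_digitos (c : Char) :
    pvDigitos.contains c = PySem.Chars.isdigit c := by
  have hval : ∀ d : Char, (c = d) ↔ (c.val.toNat = d.val.toNat) := by
    intro d
    constructor
    · intro h; rw [h]
    · intro h; exact Char.ext (UInt32.toNat_inj.mp h)
  rw [Bool.eq_iff_iff]
  simp only [pvDigitos, PySem.Chars.isdigit, List.contains_eq_mem, List.mem_cons,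
    List.mem_singleton, List.not_mem_nil, or_false, decide_eq_true_iff,
    Bool.and_eq_true, Char.le_def, UInt32.le_iff_toNat_le]
  rw [hval '0', hval '1', hval '2', hval '3', hval '4', hval '5', hval '6', hval '7',
    hval '8', hval '9']
  have e0 : '0'.val.toNat = 48 := rfl
  have e1 : '1'.val.toNat = 49 := rfl
  have e2 : '2'.val.toNat = 50 := rfl
  have e3 : '3'.val.toNat = 51 := rfl
  have e4 : '4'.val.toNat = 52 := rfl
  have e5 : '5'.val.toNat = 53 := rfl
  have e6 : '6'.val.toNat = 54 := rfl
  have e7 : '7'.val.toNat = 55 := rfl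
  have e8 : '8'.val.toNat = 56 := rfl
  have e9 : '9'.val.toNat = 57 := rfl
  omega

-- group utilities ---------------------------------------------------------

theorem pvGroups_ne_nil (l cur : List Char) : pvGroups l cur ≠ [] := by
  induction l generalizing cur with
  | nil => simp [pvGroups]
  | cons c rest ih =>
    by_cases hc : c = '.' <;> simp [pvGroups, hc, ih]

theorem pvGroups_acc (l : List Char) : ∀ cur, pvGroups l cur =
    (cur.reverse ++ (pvGroups l []).headD []) :: (pvGroups l []).tail := by
  induction l with
  | nil => intro cur; simp [pvGroups]
  | cons c rest ih =>
    intro cur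
    by_cases hc : c = '.'
    · simp [pvGroups, hc]
    · simp only [pvGroups, if_neg hc]
      rw [ih (c :: cur), ih [c]]
      simp

theorem pvGroups_snoc_dot (l : List Char) : ∀ cur,
    pvGroups (l ++ ['.']) cur = pvGroups l cur ++ [[]] := by
  induction l with
  | nil => intro cur; simp [pvGroups]
  | cons c rest ih =>
    intro cur
    by_cases hc : c = '.' <;> simp [pvGroups, hc, ih]

theorem pvGroups_snoc (l : List Char) (c : Char) (hc : c ≠ '.') : ∀ cur,
    pvGroups (l ++ [c]) cur =
      (pvGroups l cur).dropLast ++ [(pvGroups l cur).getLastD [] ++ [c]] := by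
  induction l with
  | nil => intro cur; simp [pvGroups, hc]
  | cons d rest ih =>
    intro cur
    by_cases hd : d = '.'
    · subst hd
      simp only [List.cons_append, pvGroups, if_pos rfl]
      rw [ih []]
      have hne := pvGroups_ne_nil rest []
      cases h : pvGroups rest [] with
      | nil => exact absurd h hne
      | cons g gs => simp [h]
    · simp [pvGroups, hd, ih]

theorem pv_getLastD_reverse (xs : List (List Char)) : xs.reverse.getLastD [] = xs.headD [] := by
  cases xs with
  | nil => rfl
  | cons g gs => simp [List.getLastD_eq_getLast?, List.getLast?_reverse]

theorem pvGroups_reverse (l : List Char) :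
    pvGroups l.reverse [] = ((pvGroups l []).map List.reverse).reverse := by
  induction l with
  | nil => simp [pvGroups]
  | cons c rest ih =>
    by_cases hc : c = '.'
    · subst hc
      simp only [List.reverse_cons, pvGroups_snoc_dot, ih, pvGroups, if_pos rfl]
      simp
    · simp only [List.reverse_cons, pvGroups_snoc _ c hc, ih, pvGroups, if_neg hc]
      rw [pvGroups_acc rest [c]]
      have hne : (pvGroups rest []).map List.reverse ≠ [] := by
        simpa using pvGroups_ne_nil rest []
      simp only [List.dropLast_reverse, pv_getLastD_reverse, List.map_reverse]
      cases h : pvGroups rest [] with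
      | nil => exact absurd h (pvGroups_ne_nil rest [])
      | cons g gs => simp [h]

theorem pvGroups_intercalate (l : List Char) : ∀ cur,
    List.intercalate ['.'] (pvGroups l cur) = cur.reverse ++ l := by
  induction l with
  | nil => intro cur; simp [pvGroups, List.intercalate]
  | cons c rest ih =>
    intro cur
    by_cases hc : c = '.'
    · subst hc
      simp only [pvGroups, if_pos rfl]
      cases h : pvGroups rest [] with
      | nil => exact absurd h (pvGroups_ne_nil rest [])
      | cons g gs =>
        have := ih []
        rw [h] at this
        simp only [List.intercalate, List.intersperse] at this ⊢
        simp [this]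
    · simp only [pvGroups, if_neg hc, ih (c :: cur)]
      simp

theorem pvGroups_dotfree (l : List Char) : ∀ cur, '.' ∉ cur →
    ∀ g ∈ pvGroups l cur, '.' ∉ g := by
  induction l with
  | nil => intro cur h g hg; simp [pvGroups] at hg; subst hg; simpa using h
  | cons c rest ih =>
    intro cur h g hg
    by_cases hc : c = '.'
    · subst hc
      rw [show pvGroups ('.' :: rest) cur = cur.reverse :: pvGroups rest [] from by
        simp [pvGroups]] at hg
      rcases List.mem_cons.mp hg with hg | hg
      · subst hg; simpa using h
      · exact ih [] (by simp) g hg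
    · simp only [pvGroups, if_neg hc] at hg
      exact ih (c :: cur) (by simp [h, Ne.symm hc]) g hg

theorem pv_isdigit_ne_dot {c : Char} (h : PySem.Chars.isdigit c = true) : c ≠ '.' := by
  intro hc; subst hc; simp [PySem.Chars.isdigit] at h

theorem pvLoopA_digits (g : List Char) (hg : g.all PySem.Chars.isdigit = true) : ∀ r d p,
    pvLoopA (g ++ r) d p = pvLoopA r (d + g.length) p := by
  induction g with
  | nil => intro r d p; simp
  | cons c g' ih =>
    intro r d p
    simp only [List.all_cons, Bool.and_eq_true] at hg
    have hcon : pvCaracteres.contains c = true := by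
      rw [pv_mem_caracteres]; simp [hg.1]
    simp only [List.cons_append, pvLoopA, hcon, if_neg (pv_isdigit_ne_dot hg.1)]
    rw [ih hg.2 r (d + 1) p]
    ring_nf
    simp [add_assoc, add_comm]
    congr 1
    push_cast
    ring

theorem pvLoopA_bad (g : List Char) (hdot : '.' ∉ g) (hg : ¬ (g.all PySem.Chars.isdigit = true)) :
    ∀ r d p, pvLoopA (g ++ r) d p = none := by
  induction g with
  | nil => intro r d p; simp at hg
  | cons c g' ih =>
    intro r d p
    simp only [List.mem_cons, not_or] at hdot
    by_cases hc : PySem.Chars.isdigit c = true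
    · have hcon : pvCaracteres.contains c = true := by
        rw [pv_mem_caracteres]; simp [hc]
      simp only [List.cons_append, pvLoopA, hcon, if_neg (pv_isdigit_ne_dot hc)]
      exact ih hdot.2 (by simpa [hc] using hg) r (d + 1) p
    · have hcon : pvCaracteres.contains c = false := by
        rw [pv_mem_caracteres]
        simp only [Bool.or_eq_false_iff]
        refine ⟨by simpa using hc, ?_⟩
        simpa using fun h => hdot.1 h.symm
      simp only [List.cons_append, pvLoopA]
      rw [if_pos hcon]

theorem pvLoopA_inter (gs : List (List Char)) (hdf : ∀ g ∈ gs, '.' ∉ g) : ∀ p : Int,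
    gs ≠ [] →
    pvLoopA (List.intercalate ['.'] gs) 0 p =
      (if (∀ g ∈ gs, g.all PySem.Chars.isdigit = true) ∧ (∀ g ∈ gs.dropLast, g.length = 3) then
        some (((gs.getLastD []).length : Int), p + gs.length - 1)
      else none) := by
  induction gs with
  | nil => intro p h; exact absurd rfl h
  | cons g gs' ih =>
    intro p _
    cases gs' with
    | nil =>
      have hsing : List.intercalate ['.'] [g] = g := by simp [List.intercalate]
      rw [hsing]
      by_cases hd : g.all PySem.Chars.isdigit = true
      · have h1 := pvLoopA_digits g hd [] 0 p
        rw [List.append_nil] at h1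
        rw [h1, if_pos ⟨by simpa using hd, by simp⟩]
        simp [pvLoopA]
      · have h1 := pvLoopA_bad g (hdf g (by simp)) hd [] 0 p
        rw [List.append_nil] at h1
        rw [h1, if_neg (fun hc => hd (hc.1 g (by simp)))]
    | cons g2 t =>
      have hstep : List.intercalate ['.'] (g :: g2 :: t) =
          g ++ ['.'] ++ List.intercalate ['.'] (g2 :: t) := by
        simp [List.intercalate, List.intersperse]
      rw [hstep]
      by_cases hd : g.all PySem.Chars.isdigit = true
      · rw [List.append_assoc, pvLoopA_digits g hd _ 0 p]
        simp only [List.singleton_append, pvLoopA, zero_add]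
        rw [if_neg (by decide), if_pos trivial]
        by_cases h3 : (g.length : Int) = 3
        · rw [if_pos h3]
          rw [ih (fun x hx => hdf x (List.mem_cons_of_mem g hx)) (p + 1) (by simp)]
          have h3' : g.length = 3 := by exact_mod_cast h3
          by_cases hrest : (∀ x ∈ g2 :: t, x.all PySem.Chars.isdigit = true) ∧
              (∀ x ∈ (g2 :: t).dropLast, x.length = 3)
          · have hcond : (∀ x ∈ g :: g2 :: t, x.all PySem.Chars.isdigit = true) ∧
                (∀ x ∈ (g :: g2 :: t).dropLast, x.length = 3) := by
              constructor
              · intro x hx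
                rcases List.mem_cons.mp hx with hx | hx
                · subst hx; exact hd
                · exact hrest.1 x hx
              · intro x hx
                rw [List.dropLast_cons_of_ne_nil (by simp)] at hx
                rcases List.mem_cons.mp hx with hx | hx
                · subst hx; exact h3'
                · exact hrest.2 x hx
            rw [if_pos hrest, if_pos hcond]
            simp only [List.getLastD_cons, List.length_cons, Option.some.injEq, Prod.mk.injEq]
            refine ⟨by simp, by push_cast; ring⟩
          · have hcond : ¬ ((∀ x ∈ g :: g2 :: t, x.all PySem.Chars.isdigit = true) ∧
                (∀ x ∈ (g :: g2 :: t).dropLast, x.length = 3)) := by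
              intro hall
              refine hrest ⟨fun x hx => hall.1 x (List.mem_cons_of_mem g hx), fun x hx => ?_⟩
              refine hall.2 x ?_
              rw [List.dropLast_cons_of_ne_nil (by simp)]
              exact List.mem_cons_of_mem g hx
            rw [if_neg hrest, if_neg hcond]
        · have hcond : ¬ ((∀ x ∈ g :: g2 :: t, x.all PySem.Chars.isdigit = true) ∧
              (∀ x ∈ (g :: g2 :: t).dropLast, x.length = 3)) := by
            intro hall
            refine h3 ?_
            have := hall.2 g (by
              rw [List.dropLast_cons_of_ne_nil (by simp)]
              exact List.mem_cons_self ..)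
            exact_mod_cast this
          rw [if_neg h3, if_neg hcond]
      · rw [List.append_assoc, pvLoopA_bad g (hdf g (by simp)) hd _ 0 p,
          if_neg (fun hall => hd (hall.1 g (by simp)))]

theorem pv_digcond (g : List Char) :
    g.all (fun c => pvDigitos.contains c) = g.all PySem.Chars.isdigit := by
  rw [Bool.eq_iff_iff]
  simp only [List.all_eq_true, pv_mem_digitos]

theorem pvAltCheck_single (g : List Char) :
    pvAltCheck [g] = (decide (0 < g.length) && g.all PySem.Chars.isdigit) := by
  simp only [pvAltCheck, List.length_cons, List.length_nil, List.headD_cons]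
  rw [if_pos (by simp), pv_digcond]
  rfl

theorem pvAltCheck_multi (g0 g1 : List Char) (t : List (List Char)) :
    pvAltCheck (g0 :: g1 :: t) =
      (decide (1 ≤ g0.length ∧ g0.length ≤ 3) && (g1 :: t).all (fun g => g.length == 3)
        && (g0 :: g1 :: t).all (fun g => g.all PySem.Chars.isdigit)) := by
  simp only [pvAltCheck, List.length_cons, List.headD_cons, List.tail_cons]
  rw [if_neg (by simp)]
  have : ((g0 :: g1 :: t).all fun g => g.all fun c => pvDigitos.contains c)
      = ((g0 :: g1 :: t).all fun g => g.all PySem.Chars.isdigit) := by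
    rw [Bool.eq_iff_iff]
    simp only [List.all_eq_true, pv_digcond]
  rw [this]
  rfl

theorem pv_main' (cs : List Char) : pvFinishA (pvLoopA cs.reverse 0 0) = pvAltGroups cs := by
  have hinter := pvGroups_intercalate cs.reverse []
  simp only [List.reverse_nil, List.nil_append] at hinter
  rw [show cs.reverse = List.intercalate ['.'] (pvGroups cs.reverse []) from hinter.symm,
    pvLoopA_inter _ (pvGroups_dotfree cs.reverse [] (by simp)) 0 (pvGroups_ne_nil _ _),
    pvGroups_reverse cs]
  unfold pvAltGroups
  rw [pv_splitOn cs]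
  cases hcs : pvGroups cs [] with
  | nil => exact absurd hcs (pvGroups_ne_nil cs [])
  | cons g0 Gt =>
    cases Gt with
    | nil =>
      rw [pvAltCheck_single]
      by_cases hd : g0.all PySem.Chars.isdigit = true
      · rw [if_pos ⟨by simpa [List.all_reverse] using hd, by simp⟩, hd, Bool.and_true]
        simp only [pv_getLastD_reverse, List.map_cons, List.map_nil, List.headD_cons,
          List.length_reverse, List.length_cons, List.length_nil, pvFinishA]
        rw [if_pos (by norm_num)]
        by_cases h1 : (g0.length : Int) = 0
        · rw [if_pos h1]; symm; rw [decide_eq_false_iff_not]; omega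
        · rw [if_neg h1]; symm; rw [decide_eq_true_iff]; omega
      · rw [if_neg (fun hC => hd (by simpa [List.all_reverse] using hC.1 g0.reverse (by simp))),
          (Bool.not_eq_true _).mp hd, Bool.and_false]
        rfl
    | cons g1 Gt' =>
      rw [pvAltCheck_multi]
      have hdrop : ((((g0 :: g1 :: Gt').map List.reverse).reverse).dropLast)
          = ((g1 :: Gt').map List.reverse).reverse := by
        rw [List.dropLast_reverse]; simp
      by_cases hC : (∀ g ∈ ((g0 :: g1 :: Gt').map List.reverse).reverse,
            g.all PySem.Chars.isdigit = true) ∧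
          (∀ g ∈ (((g0 :: g1 :: Gt').map List.reverse).reverse).dropLast, g.length = 3)
      · have hall : ∀ g ∈ g0 :: g1 :: Gt', g.all PySem.Chars.isdigit = true := by
          intro g hg
          have := hC.1 g.reverse (by simp only [List.mem_reverse, List.mem_map]; exact ⟨g, hg, rfl⟩)
          simpa [List.all_reverse] using this
        have hlen3 : ∀ g ∈ g1 :: Gt', g.length = 3 := by
          intro g hg
          have := hC.2 g.reverse (by
            rw [hdrop]
            simp only [List.mem_reverse, List.mem_map]
            exact ⟨g, hg, rfl⟩)
          simpa using this
        have hr1 : ((g1 :: Gt').all fun g => g.length == 3) = true := by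
          simp only [List.all_eq_true, beq_iff_eq]
          exact hlen3
        have hr2 : ((g0 :: g1 :: Gt').all fun g => g.all PySem.Chars.isdigit) = true := by
          simp only [List.all_eq_true]
          intro x hx
          exact List.all_eq_true.mp (hall x hx)
        rw [if_pos hC, hr1, hr2, Bool.and_true, Bool.and_true]
        simp only [pv_getLastD_reverse, List.map_cons, List.headD_cons, List.length_reverse,
          List.length_map, List.length_cons, pvFinishA]
        rw [if_neg (by push_cast; omega), if_pos (by push_cast; omega)]
        by_cases h1 : (g0.length : Int) = 0
        · rw [if_pos h1]; symm; rw [decide_eq_false_iff_not]; omega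
        · rw [if_neg h1]
          by_cases h2 : (g0.length : Int) > 3
          · rw [if_pos h2]; symm; rw [decide_eq_false_iff_not]; omega
          · rw [if_neg h2]; symm; rw [decide_eq_true_iff]; omega
      · have hnot : ¬ ((∀ g ∈ g0 :: g1 :: Gt', g.all PySem.Chars.isdigit = true) ∧
            (∀ g ∈ g1 :: Gt', g.length = 3)) := by
          intro h
          refine hC ⟨?_, ?_⟩
          · intro g hg
            simp only [List.mem_reverse, List.mem_map] at hg
            obtain ⟨x, hx, rfl⟩ := hg
            simpa [List.all_reverse] using h.1 x hx
          · intro g hg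
            rw [hdrop] at hg
            simp only [List.mem_reverse, List.mem_map] at hg
            obtain ⟨x, hx, rfl⟩ := hg
            simpa using h.2 x hx
        rw [if_neg hC]
        show false = _
        symm
        rw [Bool.eq_false_iff]
        intro htrue
        simp only [Bool.and_eq_true, List.all_eq_true, beq_iff_eq] at htrue
        refine hnot ⟨fun g hg => List.all_eq_true.mpr (htrue.2 g hg), htrue.1.2⟩

theorem pv_rest_none (entera : List Char) : pvRestA entera none = pvAltGroups entera := by
  unfold pvRestA
  rw [if_neg (by simp)]
  exact pv_main' entera

theorem pv_rest_some (entera dec : List Char) :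
    pvRestA entera (some dec) =
      (if entera == ['0'] && ((PySem.Int.ofChars? dec).getD 1 == 0) then false
       else pvAltGroups entera) := by
  unfold pvRestA
  by_cases he : entera = ['0']
  · subst he
    by_cases hx : ((PySem.Int.ofChars? dec).getD 1 == 0) = true
    · rw [if_pos (by simp [hx]), if_pos (by simp [hx])]
    · rw [if_neg (by simp [hx]), if_neg (by simp [hx])]
      exact pv_main' ['0']
  · have h0 : (entera == ['0']) = false := beq_eq_false_iff_ne.mpr he
    rw [if_neg (by simp [h0]), if_neg (by simp [h0])]
    exact pv_main' entera

-- ===== VERDICT (by name: the statement is the Claim_ definition above) =====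
theorem importevalido_spec : Claim_equal_importevalido := by
  intro imp _ _
  unfold Spec_importevalido importevalido importevalido_alt
  simp only [PySem.Chars.slice_eq_listSlice, PySem.List.slice_zero_start, pv_rest_some,
    pv_rest_none]
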